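-- pv_equiv track=rewrite | github.com/Jang-Jaewon/Algorithm-Study | 01_basic/005_대표값구하기.py | solution
-- ===== SOURCE A (Python) =====
-- def solution(N, l):
--   res = -1
--   min = float('inf')
--   avg_score = round(sum(l) / N)
--   for index, value in enumerate(l):
--     temp = abs(value - avg_score)
--     if temp < min:
--       min = temp
--       score = value
--       res = index+1
--     elif temp == min:
--       if value > score:
--         score = value
--         res = index+1
--   return avg_score, res
-- ===== SOURCE B (Python) =====
-- def solution(N, l):
--     avg_score = round(sum(l) / N)
--     if not l:
--         return avg_score, -1
--     min_dist = min(abs(v - avg_score) for v in l)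
--     best = max(v for v in l if abs(v - avg_score) == min_dist)
--     return avg_score, l.index(best) + 1
-- ===== Notes on version B (the rewrite author's own statement) =====
-- stated objective: simpler
-- what changed: Replaces A's single best-so-far scan with its three-way branch and tie bookkeeping by a min-distance pass, a max over the minimal-distance elements, and a first-occurrence index lookup.
import Mathlib
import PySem

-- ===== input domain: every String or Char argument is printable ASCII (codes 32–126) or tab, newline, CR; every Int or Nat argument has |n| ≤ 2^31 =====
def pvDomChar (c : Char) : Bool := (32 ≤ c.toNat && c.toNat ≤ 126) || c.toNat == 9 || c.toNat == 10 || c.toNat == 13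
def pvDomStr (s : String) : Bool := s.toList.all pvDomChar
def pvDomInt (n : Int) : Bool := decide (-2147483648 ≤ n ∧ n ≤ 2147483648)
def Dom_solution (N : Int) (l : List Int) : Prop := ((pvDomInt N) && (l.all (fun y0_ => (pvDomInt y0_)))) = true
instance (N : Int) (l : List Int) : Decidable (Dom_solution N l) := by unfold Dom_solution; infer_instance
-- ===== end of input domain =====

-- B replaces A's single best-so-far scan (three-way branch with tie logic) by a min-distance pass,
-- a filtered max pass and a first-occurrence lookup; objective: simpler. Return value only; no mutation.

-- round(s / n) for integers s, n (n ≠ 0): banker's rounding of the exact rational s/n.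
-- Exact w.r.t. CPython's float round(sum/N) whenever |s| < 2^52 (the double division is then
-- correctly rounded and ties land exactly on representable half-integers); both ports share it,
-- as both Pythons compute `round(sum(l) / N)` by the same expression.
def pyRoundDiv (s n : Int) : Int :=
  let q := PySem.Int.floordiv s n
  let r := PySem.Int.mod s n
  if 2 * r = n then (if PySem.Int.mod q 2 = 0 then q else q + 1)
  else if (2 * r - n) * n > 0 then q + 1 else q

-- ===== PORT A =====
-- one step of A's loop; state (res, min, score): Python's initial min = float('inf') is `none`,
-- Python's initially-unbound `score` is 0 here (A never reads `score` while min is still inf).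
def stepA (avg : Int) (st : Int × Option Int × Int) (p : Int × Int) : Int × Option Int × Int :=
  let temp := |p.2 - avg|
  match st.2.1 with
  | none => (p.1 + 1, some temp, p.2)
  | some m =>
    if temp < m then (p.1 + 1, some temp, p.2)
    else if temp = m then (if p.2 > st.2.2 then (p.1 + 1, some m, p.2) else st)
    else st

def solution (N : Int) (l : List Int) : Int × Int :=
  let avg := pyRoundDiv l.sum N
  let st := (PySem.List.enumerate l 0).foldl (stepA avg) (-1, none, 0)
  (avg, st.1)

-- ===== PORT B =====
def solution_alt (N : Int) (l : List Int) : Int × Int :=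
  let avg := pyRoundDiv l.sum N
  match l with
  | [] => (avg, -1)
  | _ =>
    -- l nonempty: min()/max()/index() cannot fail, `.getD 0` is never the default
    let minDist := (PySem.List.min? (l.map (fun v => |v - avg|)) (fun x => x)).getD 0
    let best := (PySem.List.max? (l.filter (fun v => |v - avg| == minDist)) (fun x => x)).getD 0
    (avg, ((PySem.List.index? l best).getD 0 : Int) + 1)

-- ===== PRECONDITION & SPEC =====
-- N = 0 makes `sum(l) / N` raise ZeroDivisionError in A (and in B alike); nothing else raises.
def Pre_solution (N : Int) (l : List Int) : Prop := N ≠ 0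
instance (N : Int) (l : List Int) : Decidable (Pre_solution N l) := by unfold Pre_solution; infer_instance
def pvWitness_solution : Int × List Int := (3, [1, 5, 4])

def Spec_solution (N : Int) (l : List Int) (out : Int × Int) : Prop := out = solution_alt N l
instance (N : Int) (l : List Int) (out : Int × Int) : Decidable (Spec_solution N l out) := by unfold Spec_solution; infer_instance

-- ===== CLAIM (what is proved, stated in full; the proofs are below) =====
def Claim_equal_solution : Prop := ∀ (N : Int) (l : List Int), Dom_solution N l → Pre_solution N l → Spec_solution N l (solution N l)

-- ===== LEMMAS AND PROOFS =====

-- uniqueness: the value (not position) of min?/max? with identity key is determined by membership + extremality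
lemma min?_id_eq_some {l : List Int} {m : Int} (hm : m ∈ l) (hmin : ∀ y ∈ l, m ≤ y) :
    PySem.List.min? l (fun x => x) = some m := by
  cases h : PySem.List.min? l (fun x => x) with
  | none => exact absurd ((PySem.List.min?_eq_none_iff _ _).1 h ▸ hm) (List.not_mem_nil)
  | some m0 =>
    have h1 := PySem.List.min?_mem h
    have h2 := PySem.List.min?_isMin h
    have := le_antisymm (h2 m hm) (hmin m0 h1)
    simp [this]

lemma max?_id_eq_some {l : List Int} {m : Int} (hm : m ∈ l) (hmax : ∀ y ∈ l, y ≤ m) :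
    PySem.List.max? l (fun x => x) = some m := by
  cases h : PySem.List.max? l (fun x => x) with
  | none => exact absurd ((PySem.List.max?_eq_none_iff _ _).1 h ▸ hm) (List.not_mem_nil)
  | some m0 =>
    have h1 := PySem.List.max?_mem h
    have h2 := PySem.List.max?_isMax h
    have := le_antisymm (hmax m0 h1) (h2 m hm)
    simp [this]

-- invariant of A's loop on a nonempty list: res is the 1-based first index of the element
-- b that has minimal distance m and maximal value among minimal-distance elements
lemma loopA_char (avg : Int) (l : List Int) (hne : l ≠ []) :
    ∃ (m b : Int) (i : Nat),
      (∃ v ∈ l, |v - avg| = m) ∧ (∀ v ∈ l, m ≤ |v - avg|) ∧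
      b ∈ l ∧ |b - avg| = m ∧ (∀ v ∈ l, |v - avg| = m → v ≤ b) ∧
      PySem.List.index? l b = some i ∧
      (PySem.List.enumerate l 0).foldl (stepA avg) (-1, none, 0) = ((i : Int) + 1, some m, b) := by
  induction l using List.reverseRecOn with
  | nil => exact absurd rfl hne
  | append_singleton xs x ih =>
    have hfold : (PySem.List.enumerate (xs ++ [x]) 0).foldl (stepA avg) (-1, none, 0)
        = stepA avg ((PySem.List.enumerate xs 0).foldl (stepA avg) (-1, none, 0)) ((xs.length : Int), x) := by
      rw [PySem.List.enumerate_append]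
      simp [PySem.List.enumerate, List.foldl_append]
    rcases eq_or_ne xs [] with hx | hx
    · subst hx
      refine ⟨|x - avg|, x, 0, ⟨x, by simp⟩, by simp, by simp, rfl, by simp, PySem.List.index?_cons_self _ _, ?_⟩
      simp [PySem.List.enumerate, stepA]
    · obtain ⟨m, b, i, ⟨v0, hv0, hv0d⟩, hmin, hbmem, hbd, hbmax, hidx, hfo⟩ := ih hx
      rw [hfold, hfo]
      rcases lt_trichotomy (|x - avg|) m with hd | hd | hd
      · -- new strict minimum
        have hnx : x ∉ xs := fun hxm => absurd (hmin x hxm) (by omega)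
        refine ⟨|x - avg|, x, xs.length, ⟨x, by simp⟩, ?_, by simp, rfl, ?_, ?_, ?_⟩
        · intro v hv; rcases List.mem_append.1 hv with h | h
          · exact le_of_lt (lt_of_lt_of_le hd (hmin v h))
          · simp at h; subst h; exact le_refl _
        · intro v hv hvd; rcases List.mem_append.1 hv with h | h
          · exact absurd (hvd ▸ hmin v h) (by omega)
          · simp at h; subst h; exact le_refl _
        · exact PySem.List.index?_append_singleton_self _ _ hnx
        · simp [stepA, hd]
      · -- equal distance
        by_cases hgt : x > b
        · have hnx : x ∉ xs := fun hxm => absurd (hbmax x hxm hd) (by omega)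
          refine ⟨m, x, xs.length, ⟨v0, by simp [hv0], hv0d⟩, ?_, by simp, hd, ?_, ?_, ?_⟩
          · intro v hv; rcases List.mem_append.1 hv with h | h
            · exact hmin v h
            · simp at h; subst h; exact le_of_eq hd.symm
          · intro v hv hvd; rcases List.mem_append.1 hv with h | h
            · exact le_of_lt (lt_of_le_of_lt (hbmax v h hvd) hgt)
            · simp at h; subst h; exact le_refl _
          · exact PySem.List.index?_append_singleton_self _ _ hnx
          · simp [stepA, hd, hgt]
        · refine ⟨m, b, i, ⟨v0, by simp [hv0], hv0d⟩, ?_, by simp [hbmem], hbd, ?_, ?_, ?_⟩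
          · intro v hv; rcases List.mem_append.1 hv with h | h
            · exact hmin v h
            · simp at h; subst h; exact le_of_eq hd.symm
          · intro v hv hvd; rcases List.mem_append.1 hv with h | h
            · exact hbmax v h hvd
            · simp at h; subst h; omega
          · rw [PySem.List.index?_append_of_mem _ hbmem]; exact hidx
          · simp [stepA, hd, hgt]
      · -- larger distance: state unchanged
        refine ⟨m, b, i, ⟨v0, by simp [hv0], hv0d⟩, ?_, by simp [hbmem], hbd, ?_, ?_, ?_⟩
        · intro v hv; rcases List.mem_append.1 hv with h | h
          · exact hmin v h
          · simp at h; subst h; exact le_of_lt hd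
        · intro v hv hvd; rcases List.mem_append.1 hv with h | h
          · exact hbmax v h hvd
          · simp at h; subst h; exact absurd hvd (by omega)
        · rw [PySem.List.index?_append_of_mem _ hbmem]; exact hidx
        · have h1 : ¬ (|x - avg| < m) := by omega
          have h2 : ¬ (|x - avg| = m) := by omega
          simp [stepA, h1, h2]

-- ===== VERDICT (by name: the statement is the Claim_ definition above) =====
theorem solution_spec : Claim_equal_solution := by
  intro N l hdom hpre
  unfold Spec_solution
  cases l with
  | nil => simp [solution, solution_alt, PySem.List.enumerate]
  | cons a t =>
    obtain ⟨m, b, i, hex, hmin, hbmem, hbd, hbmax, hidx, hfo⟩ :=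
      loopA_char (pyRoundDiv (a :: t).sum N) (a :: t) (by simp)
    set avg := pyRoundDiv (a :: t).sum N with havg
    have hm : PySem.List.min? ((a :: t).map (fun v => |v - avg|)) (fun x => x) = some m := by
      apply min?_id_eq_some
      · obtain ⟨v, hv, hvd⟩ := hex; exact List.mem_map.2 ⟨v, hv, hvd⟩
      · intro y hy; obtain ⟨v, hv, rfl⟩ := List.mem_map.1 hy; exact hmin v hv
    have hb : PySem.List.max? ((a :: t).filter (fun v => |v - avg| == m)) (fun x => x) = some b := by
      apply max?_id_eq_some
      · exact List.mem_filter.2 ⟨hbmem, by simp [hbd]⟩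
      · intro y hy; obtain ⟨h1, h2⟩ := List.mem_filter.1 hy; exact hbmax y h1 (by simpa using h2)
    have h1 : solution N (a :: t) = (avg, (i : Int) + 1) := by
      unfold solution
      rw [← havg]
      dsimp only
      rw [hfo]
    have h2 : solution_alt N (a :: t) = (avg, (i : Int) + 1) := by
      unfold solution_alt
      rw [← havg]
      dsimp only
      rw [hm, Option.getD_some, hb, Option.getD_some, hidx, Option.getD_some]
    rw [h1, h2]
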